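-- pv_equiv track=rewrite | github.com/DragonMinded/dragoncurses | dragoncurses/component.py | _text_to_hotkeys
-- ===== SOURCE A (Python) =====
-- from typing import (
--     Any,
--     Callable,
--     Dict,
--     List,
--     Optional,
--     Sequence,
--     Tuple,
--     Type,
--     TypeVar,
--     Union,
--     TYPE_CHECKING,
--     cast,
-- )
--
-- def _text_to_hotkeys(text: str) -> Tuple[str, Optional[str]]:
--     hotkey = None
--     last_char = None
--     output = ""
--
--     for char in text:
--         if char == "&":
--             # Either output it if its escaped from last time, or
--             # don't output it at all waiting to see what follows it.
--             if last_char == "&":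
--                 # Escaped & character
--                 output = output + "&"
--                 last_char = None
--                 continue
--         elif last_char == "&":
--             # If we have no hotkey, capture this as the hotkey and label
--             # it as such.
--             if hotkey is None and char.isalnum():
--                 hotkey = char
--                 output = output + "<underline>" + char + "</underline>"
--             else:
--                 # We already got our hotkey, or this is an invalid hotkey
--                 output = output + char
--         else:
--             # Just copy the input
--             output = output + char
--
--         # Remember this for next time
--         last_char = char
--
--     if hotkey is not None:
--         return (output, hotkey.lower())
--     else:
--         return (output, None)
-- ===== SOURCE B (Python) =====
-- def _text_to_hotkeys(text):
--     out = []
--     hotkey = None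
--     i = 0
--     n = len(text)
--     while i < n:
--         c = text[i]
--         if c == "&":
--             if i + 1 < n:
--                 nxt = text[i + 1]
--                 if nxt == "&":
--                     out.append("&")
--                 elif hotkey is None and nxt.isalnum():
--                     hotkey = nxt
--                     out.append("<underline>" + nxt + "</underline>")
--                 else:
--                     out.append(nxt)
--                 i += 2
--             else:
--                 i += 1
--         else:
--             out.append(c)
--             i += 1
--     return ("".join(out), hotkey.lower() if hotkey is not None else None)
-- ===== Notes on version B (the rewrite author's own statement) =====
-- stated objective: alternative
-- what changed: Replaces A's look-back state machine (a last_char flag consulted one iteration later) with a look-ahead parser that advances an index and consumes an ampersand together with its following character in one step, collecting output pieces in a list joined at the end.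
import Mathlib
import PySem

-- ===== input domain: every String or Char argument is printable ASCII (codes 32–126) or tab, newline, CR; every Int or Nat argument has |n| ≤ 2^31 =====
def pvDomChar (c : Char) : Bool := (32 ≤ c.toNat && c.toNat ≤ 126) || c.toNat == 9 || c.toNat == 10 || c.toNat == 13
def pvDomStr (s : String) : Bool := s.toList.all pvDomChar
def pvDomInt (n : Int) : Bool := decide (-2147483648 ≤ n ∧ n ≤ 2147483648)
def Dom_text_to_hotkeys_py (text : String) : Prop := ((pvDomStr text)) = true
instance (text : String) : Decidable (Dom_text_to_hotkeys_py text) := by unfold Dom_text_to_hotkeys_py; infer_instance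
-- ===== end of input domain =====

-- B replaces A's look-back (last_char) state machine by an index-free look-ahead parser that
-- consumes '&' together with its following character in one step (objective: alternative decomposition).

-- ===== PORT A =====
-- state = (hotkey, last_char, output), exactly A's three variables; one fold step per character
def aStep (st : Option Char × Option Char × List Char) (c : Char) :
    Option Char × Option Char × List Char :=
  let (hotkey, last_char, output) := st
  if c = '&' then
    if last_char = some '&' then
      -- escaped & character; 'continue' skips the trailing last_char update
      (hotkey, none, output ++ ['&'])
    else
      (hotkey, some c, output)
  else if last_char = some '&' then
    if hotkey = none ∧ PySem.Chars.isalnum c then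
      (some c, some c, output ++ "<underline>".toList ++ [c] ++ "</underline>".toList)
    else
      (hotkey, some c, output ++ [c])
  else
    (hotkey, some c, output ++ [c])

def text_to_hotkeys_py (text : String) : String × Option String :=
  let (hotkey, _, output) := text.toList.foldl aStep (none, none, [])
  match hotkey with
  | some h => (String.ofList output, some (String.ofList [PySem.Chars.lowerChar h]))
  | none => (String.ofList output, none)

-- ===== PORT B =====
-- look-ahead: an '&' is consumed together with the next character in a single step
def bGo (cs : List Char) (hotkey : Option Char) : List Char × Option Char :=
  match cs with
  | [] => ([], hotkey)
  | c :: rest =>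
    if c = '&' then
      match rest with
      | [] => ([], hotkey)  -- trailing '&': emit nothing
      | nxt :: rest2 =>
        if nxt = '&' then
          let (o, h) := bGo rest2 hotkey
          ('&' :: o, h)
        else if hotkey = none ∧ PySem.Chars.isalnum nxt then
          let (o, h) := bGo rest2 (some nxt)
          ("<underline>".toList ++ nxt :: "</underline>".toList ++ o, h)
        else
          let (o, h) := bGo rest2 hotkey
          (nxt :: o, h)
    else
      let (o, h) := bGo rest hotkey
      (c :: o, h)

def text_to_hotkeys_py_alt (text : String) : String × Option String :=
  let (output, hotkey) := bGo text.toList none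
  match hotkey with
  | some h => (String.ofList output, some (String.ofList [PySem.Chars.lowerChar h]))
  | none => (String.ofList output, none)

-- ===== PRECONDITION & SPEC =====
def Spec_text_to_hotkeys_py (text : String) (out : String × Option String) : Prop := out = text_to_hotkeys_py_alt text
instance (text : String) (out : String × Option String) : Decidable (Spec_text_to_hotkeys_py text out) := by unfold Spec_text_to_hotkeys_py; infer_instance

-- ===== CLAIM (what is proved, stated in full; the proofs are below) =====
def Claim_equal_text_to_hotkeys_py : Prop := ∀ (text : String), Dom_text_to_hotkeys_py text → Spec_text_to_hotkeys_py text (text_to_hotkeys_py text)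

-- ===== LEMMAS AND PROOFS =====

-- Invariant: whenever last_char is not '&', A's remaining fold agrees with B's look-ahead run.
lemma key (n : Nat) : ∀ (cs : List Char), cs.length ≤ n →
    ∀ (hk last : Option Char) (out : List Char), last ≠ some '&' →
    ∃ l', cs.foldl aStep (hk, last, out) = ((bGo cs hk).2, l', out ++ (bGo cs hk).1) := by
  induction n with
  | zero =>
    intro cs hlen hk last out _
    match cs, hlen with
    | [], _ => exact ⟨last, by simp [bGo]⟩
  | succ n ih =>
    intro cs hlen hk last out hlast
    match cs with
    | [] => exact ⟨last, by simp [bGo]⟩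
    | c :: rest =>
      by_cases hc : c = '&'
      · subst hc
        -- A takes one step to last_char = '&'; B looks ahead
        have hstep : aStep (hk, last, out) '&' = (hk, some '&', out) := by
          simp [aStep, hlast]
        match rest with
        | [] =>
          exact ⟨some '&', by simp [bGo, hstep]⟩
        | nxt :: rest2 =>
          have hlen2 : rest2.length ≤ n := by simp at hlen; omega
          by_cases hn : nxt = '&'
          · subst hn
            have hstep2 : aStep (hk, some '&', out) '&' = (hk, none, out ++ ['&']) := by
              simp [aStep]
            obtain ⟨l', hrec⟩ := ih rest2 hlen2 hk none (out ++ ['&']) (by simp)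
            refine ⟨l', ?_⟩
            simp only [List.foldl_cons, hstep, hstep2, hrec, bGo]
            simp
          · by_cases hcap : hk = none ∧ PySem.Chars.isalnum nxt
            · have hstep2 : aStep (hk, some '&', out) nxt =
                  (some nxt, some nxt, out ++ "<underline>".toList ++ [nxt] ++ "</underline>".toList) := by
                simp [aStep, hn, hcap]
              obtain ⟨l', hrec⟩ := ih rest2 hlen2 (some nxt) (some nxt)
                (out ++ "<underline>".toList ++ [nxt] ++ "</underline>".toList)
                (by simp; intro h; exact hn (h ▸ rfl))
              refine ⟨l', ?_⟩
              simp only [List.foldl_cons, hstep, hstep2, hrec, bGo, if_neg hn, if_pos hcap]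
              simp
            · have hstep2 : aStep (hk, some '&', out) nxt = (hk, some nxt, out ++ [nxt]) := by
                simp [aStep, hn, hcap]
              obtain ⟨l', hrec⟩ := ih rest2 hlen2 hk (some nxt) (out ++ [nxt])
                (by simp; intro h; exact hn (h ▸ rfl))
              refine ⟨l', ?_⟩
              simp only [List.foldl_cons, hstep, hstep2, hrec, bGo, if_neg hn, if_neg hcap]
              simp
      · have hstep : aStep (hk, last, out) c = (hk, some c, out ++ [c]) := by
          simp [aStep, hc, hlast]
        have hlen1 : rest.length ≤ n := by simp at hlen; omega
        obtain ⟨l', hrec⟩ := ih rest hlen1 hk (some c) (out ++ [c])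
          (by simp; intro h; exact hc (h ▸ rfl))
        have hb : bGo (c :: rest) hk = (c :: (bGo rest hk).1, (bGo rest hk).2) := by
          conv_lhs => rw [bGo.eq_def]
          simp [hc]
        refine ⟨l', ?_⟩
        rw [List.foldl_cons, hstep, hrec, hb]
        simp

-- ===== VERDICT (by name: the statement is the Claim_ definition above) =====
theorem text_to_hotkeys_py_spec : Claim_equal_text_to_hotkeys_py := by
  intro text _
  unfold Spec_text_to_hotkeys_py text_to_hotkeys_py text_to_hotkeys_py_alt
  obtain ⟨l', h⟩ := key text.toList.length text.toList le_rfl none none [] (by simp)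
  rw [h]
  rcases bGo text.toList none with ⟨o, hk⟩; cases hk <;> simp
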